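-- pv_equiv track=rewrite | github.com/mellinkarl/Conversions | task.py | conv_endian
-- ===== SOURCE A (Python) =====
-- def conv_endian(num, endian='big'):
--     neg_flag = num < 0
--     pos_num = abs(num)
--
--     def int_to_hex(digit):
--         hex_chars = "0123456789ABCDEF"
--         hexer = ""
--         if digit == 0:
--             return "0"
--         while digit > 0:
--             remainder = digit % 16
--             hexer = hex_chars[remainder] + hexer
--             digit = digit // 16
--         return hexer
--
--     hex_str = int_to_hex(pos_num)
--
--     hex_length = len(hex_str)
--     if hex_length % 2 != 0:
--         hex_str = "0" + hex_str
--
--     byte_list = []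
--     hex_length = len(hex_str)
--     for i in range(0, hex_length, 2):
--         byte = hex_str[i:i+2]
--         byte_list.append(byte)
--
--     if endian == 'little':
--         byte_list.reverse()
--     elif endian == 'big':
--         pass
--     else:
--         return None
--
--     result = byte_list
--     result = ' '.join(result)
--     if neg_flag:
--         result = '-'+result
--     return result
-- ===== SOURCE B (Python) =====
-- def conv_endian(num, endian='big'):
--     if endian != 'big' and endian != 'little':
--         return None
--     neg = num < 0
--     n = abs(num)
--     parts = []
--     while True:
--         parts.append(format(n % 256, '02X'))
--         n //= 256
--         if n == 0:
--             break
--     if endian == 'big':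
--         parts.reverse()
--     res = ' '.join(parts)
--     return '-' + res if neg else res
-- ===== Notes on version B (the rewrite author's own statement) =====
-- stated objective: simpler
-- what changed: B extracts base-256 bytes directly (one %256-//256 loop producing ready two-digit byte strings, least significant first, reversed for 'big'), replacing A's build-hex-digit-string, pad-to-even, slice-into-pairs pipeline.
import Mathlib
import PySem

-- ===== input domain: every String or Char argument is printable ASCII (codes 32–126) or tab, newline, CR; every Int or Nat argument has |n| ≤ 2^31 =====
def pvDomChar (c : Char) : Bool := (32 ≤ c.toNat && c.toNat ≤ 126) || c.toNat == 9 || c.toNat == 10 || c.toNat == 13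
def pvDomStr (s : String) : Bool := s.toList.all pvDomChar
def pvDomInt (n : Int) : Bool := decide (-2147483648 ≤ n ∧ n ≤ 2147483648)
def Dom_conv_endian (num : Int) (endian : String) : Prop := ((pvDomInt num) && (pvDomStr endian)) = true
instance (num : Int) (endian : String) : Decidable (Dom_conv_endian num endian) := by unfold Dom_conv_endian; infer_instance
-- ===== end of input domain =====

-- B replaces A's hex-string/pad/slice-pairs pipeline with direct base-256 byte extraction (simpler, same cost).


-- shared digit table: hex_chars[k] / the k-th uppercase hex digit (both Pythons index it only with k < 16, so getD is exact)
def pvHexDigit (k : Nat) : Char := "0123456789ABCDEF".toList.getD k '0'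

-- ===== PORT A =====
-- the `while digit > 0` loop of int_to_hex; digit = abs(num) ≥ 0, so it is modeled on Nat
-- (Python's % and // on nonnegative ints coincide with Nat.mod / Nat.div)
def intToHexLoop (digit : Nat) (hexer : List Char) : List Char :=
  if digit = 0 then hexer
  else intToHexLoop (digit / 16) (pvHexDigit (digit % 16) :: hexer)
termination_by digit
decreasing_by exact Nat.div_lt_self (by omega) (by omega)

def intToHex (digit : Nat) : List Char :=
  if digit = 0 then ['0'] else intToHexLoop digit []

def conv_endian (num : Int) (endian : String) : Option String :=
  let negFlag := num < 0
  let posNum := num.natAbs                       -- abs(num)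
  let hexStr := intToHex posNum
  let hexStr := if hexStr.length % 2 ≠ 0 then '0' :: hexStr else hexStr
  let byteList := (PySem.List.pyRange 0 (hexStr.length : Int) 2).foldl
      (fun acc i => acc ++ [PySem.List.slice hexStr (some i) (some (i + 2))]) []
  let byteList? :=
    if endian = "little" then some byteList.reverse
    else if endian = "big" then some byteList
    else none                                    -- return None
  byteList?.map fun bl =>
    let result := PySem.Chars.join [' '] bl      -- ' '.join(result)
    String.ofList (if negFlag then '-' :: result else result)

-- ===== PORT B =====
-- format(b, '02X') for 0 ≤ b < 256
def byte2 (b : Nat) : List Char := [pvHexDigit (b / 16), pvHexDigit (b % 16)]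

-- the do-while loop of Source B: bytes of n, least significant first (runs at least once)
def bytesLE (n : Nat) : List (List Char) :=
  if n / 256 = 0 then [byte2 (n % 256)]
  else byte2 (n % 256) :: bytesLE (n / 256)
termination_by n
decreasing_by exact Nat.div_lt_self (by omega) (by omega)

def conv_endian_alt (num : Int) (endian : String) : Option String :=
  if endian ≠ "big" ∧ endian ≠ "little" then none
  else
    let neg := num < 0
    let parts := bytesLE num.natAbs
    let parts := if endian = "big" then parts.reverse else parts
    let res := PySem.Chars.join [' '] parts
    some (String.ofList (if neg then '-' :: res else res))

-- ===== PRECONDITION & SPEC =====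
def Spec_conv_endian (num : Int) (endian : String) (out : Option String) : Prop := out = conv_endian_alt num endian
instance (num : Int) (endian : String) (out : Option String) : Decidable (Spec_conv_endian num endian out) := by unfold Spec_conv_endian; infer_instance

-- ===== CLAIM (what is proved, stated in full; the proofs are below) =====
def Claim_equal_conv_endian : Prop := ∀ (num : Int) (endian : String), Dom_conv_endian num endian → Spec_conv_endian num endian (conv_endian num endian)

-- ===== LEMMAS AND PROOFS =====

-- A's padding step, as a function
def padEven (s : List Char) : List Char := if s.length % 2 ≠ 0 then '0' :: s else s

-- A's byte_list fold, as a function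
def pairsFold (s : List Char) : List (List Char) :=
  (PySem.List.pyRange 0 (s.length : Int) 2).foldl
    (fun acc i => acc ++ [PySem.List.slice s (some i) (some (i + 2))]) []

-- closed form of A's byte_list (for even-length strings)
def pairsMap (s : List Char) : List (List Char) :=
  (List.range (s.length / 2)).map (fun k => (s.drop (2 * k)).take 2)

theorem foldl_append_singleton {α β : Type} (f : α → β) (l : List α) (acc : List β) :
    l.foldl (fun a i => a ++ [f i]) acc = acc ++ l.map f := by
  induction l generalizing acc with
  | nil => simp
  | cons x xs ih => simp [List.foldl, ih]

theorem pairsFold_eq_pairsMap (s : List Char) (h : s.length % 2 = 0) :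
    pairsFold s = pairsMap s := by
  unfold pairsFold pairsMap
  rw [PySem.List.pyRange_of_pos 0 (s.length : Int) (by norm_num),
    foldl_append_singleton]
  rcases Nat.even_iff.mpr h with ⟨m, hm⟩
  have hmm : s.length = 2 * m := by omega
  have hcount :
      (if (0:Int) < (s.length : Int) then (((s.length : Int) - 0 + 2 - 1) / 2).toNat else 0)
        = s.length / 2 := by
    split <;> omega
  rw [hcount]
  simp only [List.nil_append, List.map_map]
  apply List.map_congr_left
  intro k hk
  simp only [List.mem_range] at hk
  simp only [Function.comp]
  have hcast : ((0:Int) + 2 * (k : Int)) = ((2 * k : Nat) : Int) := by push_cast; ring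
  have hcast2 : ((0:Int) + 2 * (k : Int) + 2) = ((2 * k : Nat) : Int) + ((2 : Nat) : Int) := by
    push_cast; ring
  rw [hcast2, hcast, PySem.List.slice_natCast_add]

theorem length_padEven_even (s : List Char) : (padEven s).length % 2 = 0 := by
  unfold padEven; split
  · simp only [List.length_cons]; omega
  · omega

theorem padEven_append_two (s : List Char) (a b : Char) :
    padEven (s ++ [a, b]) = padEven s ++ [a, b] := by
  unfold padEven
  have : (s ++ [a, b]).length = s.length + 2 := by simp
  rw [this]
  split <;> split <;> first | rfl | omega

theorem pairsMap_append_two (s : List Char) (a b : Char) (h : s.length % 2 = 0) :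
    pairsMap (s ++ [a, b]) = pairsMap s ++ [[a, b]] := by
  unfold pairsMap
  have hlen : (s ++ [a, b]).length = s.length + 2 := by simp
  have hdiv : (s.length + 2) / 2 = s.length / 2 + 1 := by omega
  rw [hlen, hdiv, List.range_succ, List.map_append]
  congr 1
  · apply List.map_congr_left
    intro k hk
    simp only [List.mem_range] at hk
    have h2k : 2 * k + 2 ≤ s.length := by omega
    rw [List.drop_append_of_le_length (by omega), List.take_append_of_le_length]
    have : (s.drop (2 * k)).length = s.length - 2 * k := by simp
    omega
  · simp only [List.map_cons, List.map_nil]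
    have h2 : 2 * (s.length / 2) = s.length := by omega
    rw [h2, List.drop_left]
    rfl

theorem intToHexLoop_append (d : Nat) (acc : List Char) :
    intToHexLoop d acc = intToHexLoop d [] ++ acc := by
  induction d using Nat.strong_induction_on generalizing acc with
  | _ d ih =>
    by_cases h : d = 0
    · subst h
      rw [intToHexLoop, if_pos rfl, intToHexLoop, if_pos rfl]
      simp
    · have hlt : d / 16 < d := Nat.div_lt_self (by omega) (by omega)
      have hunf : ∀ a : List Char, intToHexLoop d a
          = intToHexLoop (d / 16) (pvHexDigit (d % 16) :: a) := by
        intro a; rw [intToHexLoop, if_neg h]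
      rw [hunf acc, hunf [], ih (d / 16) hlt (pvHexDigit (d % 16) :: acc),
        ih (d / 16) hlt [pvHexDigit (d % 16)]]
      simp

theorem intToHex_lt16 (n : Nat) (h : n < 16) : intToHex n = [pvHexDigit n] := by
  by_cases h0 : n = 0
  · subst h0; rfl
  · rw [intToHex, if_neg h0, intToHexLoop, if_neg h0, intToHexLoop]
    have : n / 16 = 0 := by omega
    simp [this, Nat.mod_eq_of_lt h]

theorem intToHex_lt256 (n : Nat) (h16 : 16 ≤ n) (h : n < 256) :
    intToHex n = [pvHexDigit (n / 16), pvHexDigit (n % 16)] := by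
  rw [intToHex, if_neg (by omega), intToHexLoop, if_neg (by omega), intToHexLoop,
    if_neg (by omega : ¬ n / 16 = 0), intToHexLoop]
  have h1 : n / 16 / 16 = 0 := by omega
  have h2 : n / 16 % 16 = n / 16 := Nat.mod_eq_of_lt (by omega)
  simp [h1, h2]

theorem intToHex_ge256 (n : Nat) (h : 256 ≤ n) :
    intToHex n = intToHex (n / 256) ++ [pvHexDigit (n / 16 % 16), pvHexDigit (n % 16)] := by
  rw [intToHex, if_neg (by omega), intToHexLoop, if_neg (by omega), intToHexLoop,
    if_neg (by omega : ¬ n / 16 = 0)]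
  have hd : n / 16 / 16 = n / 256 := by
    rw [Nat.div_div_eq_div_mul]
  rw [hd, intToHexLoop_append, intToHex, if_neg (by omega : ¬ n / 256 = 0)]

theorem bytes_main (n : Nat) : pairsMap (padEven (intToHex n)) = (bytesLE n).reverse := by
  induction n using Nat.strong_induction_on with
  | _ n ih =>
    by_cases hbig : 256 ≤ n
    · rw [intToHex_ge256 n hbig, padEven_append_two,
        pairsMap_append_two _ _ _ (length_padEven_even _),
        ih (n / 256) (Nat.div_lt_self (by omega) (by omega))]
      have hb : bytesLE n = byte2 (n % 256) :: bytesLE (n / 256) := by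
        rw [bytesLE, if_neg (by omega : ¬ n / 256 = 0)]
      rw [hb, List.reverse_cons]
      congr 2
      unfold byte2
      have e1 : n / 16 % 16 = n % 256 / 16 := by omega
      have e2 : n % 16 = n % 256 % 16 := by omega
      rw [e1, e2]
    · have hb : bytesLE n = [byte2 (n % 256)] := by
        rw [bytesLE, if_pos (by omega : n / 256 = 0)]
      rw [hb]
      have hn : n % 256 = n := Nat.mod_eq_of_lt (by omega)
      rw [hn]
      by_cases h16 : n < 16
      · rw [intToHex_lt16 n h16]
        have : padEven [pvHexDigit n] = ['0', pvHexDigit n] := by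
          unfold padEven; simp
        rw [this]
        unfold byte2
        have e1 : n / 16 = 0 := by omega
        have e2 : n % 16 = n := by omega
        rw [e1, e2, show pvHexDigit 0 = '0' from by decide]
        simp [pairsMap, List.range_succ]
      · rw [intToHex_lt256 n (by omega) (by omega)]
        have : padEven [pvHexDigit (n / 16), pvHexDigit (n % 16)]
            = [pvHexDigit (n / 16), pvHexDigit (n % 16)] := by
          unfold padEven; simp
        rw [this]
        simp [pairsMap, byte2, List.range_succ]

theorem byteList_eq (n : Nat) :
    pairsFold (padEven (intToHex n)) = (bytesLE n).reverse := by
  rw [pairsFold_eq_pairsMap _ (length_padEven_even _), bytes_main]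

-- ===== VERDICT (by name: the statement is the Claim_ definition above) =====
theorem conv_endian_spec : Claim_equal_conv_endian := by
  intro num endian _
  unfold Spec_conv_endian conv_endian conv_endian_alt
  have hA : ∀ s : List Char,
      (if s.length % 2 ≠ 0 then '0' :: s else s) = padEven s := fun _ => rfl
  simp only [hA]
  have hF : ∀ s : List Char,
      (PySem.List.pyRange 0 (s.length : Int) 2).foldl
        (fun acc i => acc ++ [PySem.List.slice s (some i) (some (i + 2))]) []
        = pairsFold s := fun _ => rfl
  simp only [hF, byteList_eq]
  by_cases hl : endian = "little"
  · simp [hl, List.reverse_reverse]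
  · by_cases hb : endian = "big"
    · simp [hb]
    · simp [hl, hb]
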